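-- pv_equiv track=rewrite | github.com/SrutiElan/sentiment-analysis | server/feature_builders.py | _ngrams_present
-- ===== SOURCE A (Python) =====
-- NGRAM_COLUMNS = [
--     "ngram_great app", "ngram_good app", "ngram_easy use", "ngram_love app",
--     "ngram_pro version", "ngram_google calendar", "ngram_free version",
--     "ngram_use app", "ngram_like app", "ngram_doesnt work",
--     "ngram_really like app", "ngram_app easy use", "ngram_buy pro version",
--     "ngram_using app years", "ngram_paid pro version", "ngram_really good app",
--     "ngram_simple easy use", "ngram_used app years",
--     "ngram_sync google calendar", "ngram_todo list app"
-- ]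
--
-- def _ngrams_present(cleaned: str) -> dict:
--     words = cleaned.split()
--     bigrams = [" ".join(pair) for pair in zip(words, words[1:])]
--     trigrams = [" ".join(tri) for tri in zip(words, words[1:], words[2:])]
--     bag = set(bigrams) | set(trigrams)
--
--     flags = {}
--     for col in NGRAM_COLUMNS:
--         phrase = col.replace("ngram_", "")
--         flags[col] = 1 if phrase in bag else 0
--     return flags
-- ===== SOURCE B (Python) =====
-- NGRAM_COLUMNS = [
--     "ngram_great app", "ngram_good app", "ngram_easy use", "ngram_love app",
--     "ngram_pro version", "ngram_google calendar", "ngram_free version",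
--     "ngram_use app", "ngram_like app", "ngram_doesnt work",
--     "ngram_really like app", "ngram_app easy use", "ngram_buy pro version",
--     "ngram_using app years", "ngram_paid pro version", "ngram_really good app",
--     "ngram_simple easy use", "ngram_used app years",
--     "ngram_sync google calendar", "ngram_todo list app"
-- ]
--
-- def _ngrams_present(cleaned: str) -> dict:
--     # No precomputed n-gram bag: slide a 2/3-word window over the words per phrase.
--     words = cleaned.split()
--     n = len(words)
--     flags = {}
--     for col in NGRAM_COLUMNS:
--         phrase = col[len("ngram_"):]
--         hit = any(" ".join(words[i:i+2]) == phrase or " ".join(words[i:i+3]) == phrase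
--                   for i in range(n - 1))
--         flags[col] = 1 if hit else 0
--     return flags
-- ===== Notes on version B (the rewrite author's own statement) =====
-- stated objective: alternative
-- what changed: Instead of materialising bigram/trigram lists and a set-union bag up front, B slides a 2/3-word window over the word list per phrase and checks for a matching window directly, building no intermediate collections.
import Mathlib
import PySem

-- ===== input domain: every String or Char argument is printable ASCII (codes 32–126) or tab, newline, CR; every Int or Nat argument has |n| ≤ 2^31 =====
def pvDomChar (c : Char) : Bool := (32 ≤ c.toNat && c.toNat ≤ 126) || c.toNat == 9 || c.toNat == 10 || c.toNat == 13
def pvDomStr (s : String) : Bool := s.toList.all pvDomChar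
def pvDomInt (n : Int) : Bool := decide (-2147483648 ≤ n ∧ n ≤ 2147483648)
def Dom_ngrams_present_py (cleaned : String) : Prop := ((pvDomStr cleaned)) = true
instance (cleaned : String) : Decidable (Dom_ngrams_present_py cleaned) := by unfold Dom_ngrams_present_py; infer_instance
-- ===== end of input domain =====

-- B slides a 2/3-word window over the word list per phrase instead of building the
-- bigram/trigram lists and their set-union bag up front (objective: alternative).

def pvNGRAM_COLUMNS : List String := [
  "ngram_great app", "ngram_good app", "ngram_easy use", "ngram_love app",
  "ngram_pro version", "ngram_google calendar", "ngram_free version",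
  "ngram_use app", "ngram_like app", "ngram_doesnt work",
  "ngram_really like app", "ngram_app easy use", "ngram_buy pro version",
  "ngram_using app years", "ngram_paid pro version", "ngram_really good app",
  "ngram_simple easy use", "ngram_used app years",
  "ngram_sync google calendar", "ngram_todo list app"]

-- ===== PORT A =====
def ngrams_present_py (cleaned : String) : List (String × Int) :=
  let words := PySem.Str.split₀ cleaned
  let bigrams := (words.zip (PySem.List.slice words (some 1) none)).map
      (fun p => PySem.Str.join " " [p.1, p.2])
  let trigrams := ((words.zip (PySem.List.slice words (some 1) none)).zip
      (PySem.List.slice words (some 2) none)).map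
      (fun p => PySem.Str.join " " [p.1.1, p.1.2, p.2])
  let bag : PySem.Set String :=
    PySem.Set.union (PySem.Set.ofList bigrams) (PySem.Set.ofList trigrams)
  let flags := pvNGRAM_COLUMNS.foldl (fun d col =>
      let phrase := PySem.Str.replace col "ngram_" ""
      d.insert col (if PySem.Set.contains bag phrase then (1 : Int) else 0))
    PySem.Dict.empty
  flags.items

-- ===== PORT B =====
def ngrams_present_py_alt (cleaned : String) : List (String × Int) :=
  let words := PySem.Str.split₀ cleaned
  let n : Int := (words.length : Int)
  let flags := pvNGRAM_COLUMNS.foldl (fun d col =>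
      let phrase := PySem.Str.slice col (some 6) none
      let hit := (PySem.List.pyRange 0 (n - 1) 1).any (fun i =>
          (PySem.Str.join " " (PySem.List.slice words (some i) (some (i + 2))) == phrase) ||
          (PySem.Str.join " " (PySem.List.slice words (some i) (some (i + 3))) == phrase))
      d.insert col (if hit then (1 : Int) else 0))
    PySem.Dict.empty
  flags.items

-- ===== PRECONDITION & SPEC =====
def Spec_ngrams_present_py (cleaned : String) (out : List (String × Int)) : Prop := out = ngrams_present_py_alt cleaned
instance (cleaned : String) (out : List (String × Int)) : Decidable (Spec_ngrams_present_py cleaned out) := by unfold Spec_ngrams_present_py; infer_instance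

-- ===== CLAIM (what is proved, stated in full; the proofs are below) =====
def Claim_equal_ngrams_present_py : Prop := ∀ (cleaned : String), Dom_ngrams_present_py cleaned → Spec_ngrams_present_py cleaned (ngrams_present_py cleaned)

-- ===== LEMMAS AND PROOFS =====

theorem pv_toNat2 : (2 : Int).toNat = 2 := rfl
theorem pv_toNat3 : (3 : Int).toNat = 3 := rfl

theorem pv_bool_ext {a b : Bool} (h : (a = true) ↔ (b = true)) : a = b := by
  cases a <;> cases b <;> simp_all

theorem pv_slice (words : List String) (i k : Int) (hi : 0 ≤ i) (hk : 0 ≤ k) :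
    PySem.List.slice words (some i) (some (i + k)) = (words.drop i.toNat).take k.toNat := by
  rw [PySem.List.slice_toNat words hi (by omega)]
  congr 1
  omega

theorem pv_win2 (words : List String) (j : Nat) (h : j + 1 < words.length) :
    (words.drop j).take 2 = [words[j], words[j + 1]] := by
  rw [List.drop_eq_getElem_cons (by omega), List.drop_eq_getElem_cons (h := h)]
  rfl

theorem pv_win3a (words : List String) (j : Nat) (h : j + 2 < words.length) :
    (words.drop j).take 3 = [words[j], words[j + 1], words[j + 2]] := by
  rw [List.drop_eq_getElem_cons (by omega), List.drop_eq_getElem_cons (by omega),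
      List.drop_eq_getElem_cons (h := h)]
  rfl

theorem pv_win3b (words : List String) (j : Nat) (h1 : j + 1 < words.length)
    (h2 : words.length ≤ j + 2) :
    (words.drop j).take 3 = [words[j], words[j + 1]] := by
  rw [List.drop_eq_getElem_cons (by omega), List.drop_eq_getElem_cons (h := h1),
      List.drop_eq_nil_of_le (by omega)]
  rfl

theorem pv_mem_bi (words : List String) (phrase : String) :
    (phrase ∈ (words.zip words.tail).map (fun p => PySem.Str.join " " [p.1, p.2])) ↔
      ∃ (j : Nat) (h : j + 1 < words.length),
        PySem.Str.join " " [words[j], words[j + 1]] = phrase := by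
  rw [List.mem_map]
  constructor
  · rintro ⟨p, hp, hfp⟩
    obtain ⟨j, hj, hpj⟩ := List.mem_iff_getElem.mp hp
    have hjN : j + 1 < words.length := by
      simp only [List.length_zip, List.length_tail] at hj; omega
    refine ⟨j, hjN, ?_⟩
    rw [← hfp, ← hpj]
    simp [List.getElem_zip, List.getElem_tail]
  · rintro ⟨j, hjN, hf⟩
    refine ⟨(words[j], words[j + 1]), ?_, hf⟩
    rw [List.mem_iff_getElem]
    refine ⟨j, by simp only [List.length_zip, List.length_tail]; omega, ?_⟩
    simp [List.getElem_zip, List.getElem_tail]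

theorem pv_mem_tri (words : List String) (phrase : String) :
    (phrase ∈ ((words.zip words.tail).zip (words.drop 2)).map
        (fun p => PySem.Str.join " " [p.1.1, p.1.2, p.2])) ↔
      ∃ (j : Nat) (h : j + 2 < words.length),
        PySem.Str.join " " [words[j], words[j + 1], words[j + 2]] = phrase := by
  rw [List.mem_map]
  constructor
  · rintro ⟨p, hp, hfp⟩
    obtain ⟨j, hj, hpj⟩ := List.mem_iff_getElem.mp hp
    have hjN : j + 2 < words.length := by
      simp only [List.length_zip, List.length_tail, List.length_drop] at hj
      omega
    refine ⟨j, hjN, ?_⟩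
    rw [← hfp, ← hpj]
    simp only [List.getElem_zip, List.getElem_tail, List.getElem_drop]
    simp [Nat.add_comm]
  · rintro ⟨j, hjN, hf⟩
    refine ⟨((words[j], words[j + 1]), words[j + 2]), ?_, hf⟩
    rw [List.mem_iff_getElem]
    refine ⟨j, by simp only [List.length_zip, List.length_tail, List.length_drop]; omega, ?_⟩
    simp only [List.getElem_zip, List.getElem_tail, List.getElem_drop]
    simp [Nat.add_comm]

-- A's "phrase ∈ bag" equals B's sliding-window scan, for any word list and phrase.
theorem pv_core (words : List String) (phrase : String) :
    PySem.Set.contains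
      (PySem.Set.union
        (PySem.Set.ofList ((words.zip (PySem.List.slice words (some 1) none)).map
          (fun p => PySem.Str.join " " [p.1, p.2])))
        (PySem.Set.ofList (((words.zip (PySem.List.slice words (some 1) none)).zip
          (PySem.List.slice words (some 2) none)).map
          (fun p => PySem.Str.join " " [p.1.1, p.1.2, p.2]))))
      phrase
    = (PySem.List.pyRange 0 ((words.length : Int) - 1) 1).any (fun i =>
          (PySem.Str.join " " (PySem.List.slice words (some i) (some (i + 2))) == phrase) ||
          (PySem.Str.join " " (PySem.List.slice words (some i) (some (i + 3))) == phrase)) := by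
  have hsl1 : PySem.List.slice words (some 1) none = words.tail :=
    PySem.List.slice_from_one words
  have hsl2 : PySem.List.slice words (some 2) none = words.drop 2 := by
    rw [PySem.List.slice_from words (by norm_num)]
    rfl
  rw [hsl1, hsl2]
  apply pv_bool_ext
  rw [PySem.Set.contains_iff, PySem.Set.mem_union, PySem.Set.mem_ofList, PySem.Set.mem_ofList,
      List.any_eq_true, pv_mem_bi, pv_mem_tri]
  simp only [Bool.or_eq_true, beq_iff_eq, PySem.List.mem_pyRange_one]
  constructor
  · rintro (⟨j, hjN, hf⟩ | ⟨j, hjN, hf⟩)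
    · refine ⟨(j : Int), ⟨by omega, by omega⟩, Or.inl ?_⟩
      rw [pv_slice words _ 2 (by omega) (by omega)]
      simp only [Int.toNat_natCast, pv_toNat2]
      rw [pv_win2 words j hjN]; exact hf
    · refine ⟨(j : Int), ⟨by omega, by omega⟩, Or.inr ?_⟩
      rw [pv_slice words _ 3 (by omega) (by omega)]
      simp only [Int.toNat_natCast, pv_toNat3]
      rw [pv_win3a words j hjN]; exact hf
  · rintro ⟨i, ⟨hi0, hiN⟩, hcond⟩
    have hji : ((i.toNat : Int)) = i := Int.toNat_of_nonneg hi0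
    set j := i.toNat with hj
    have hjN : j + 1 < words.length := by omega
    rw [← hji, pv_slice words _ 2 (by omega) (by omega),
        pv_slice words _ 3 (by omega) (by omega)] at hcond
    simp only [Int.toNat_natCast, pv_toNat2, pv_toNat3] at hcond
    rcases hcond with h2 | h3
    · exact Or.inl ⟨j, hjN, by rw [pv_win2 words j hjN] at h2; exact h2⟩
    · by_cases hN : j + 2 < words.length
      · exact Or.inr ⟨j, hN, by rw [pv_win3a words j hN] at h3; exact h3⟩
      · exact Or.inl ⟨j, hjN, by rw [pv_win3b words j hjN (by omega)] at h3; exact h3⟩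

-- the two fold bodies agree on every column of the list folded over
theorem pv_foldl_congr {α β : Type} (l : List α) (f g : β → α → β)
    (h : ∀ (d : β) (col : α), col ∈ l → f d col = g d col) (d : β) :
    l.foldl f d = l.foldl g d := by
  induction l generalizing d with
  | nil => rfl
  | cons x xs ih =>
      simp only [List.foldl_cons]
      rw [h d x (by simp)]
      exact ih (fun d c hc => h d c (by simp [hc])) _

-- on each literal column, Python's col.replace("ngram_","") is col[6:]
theorem pv_phrase (col : String) (h : col ∈ pvNGRAM_COLUMNS) :
    PySem.Str.replace col "ngram_" "" = PySem.Str.slice col (some 6) none := by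
  fin_cases h <;> decide

-- ===== VERDICT (by name: the statement is the Claim_ definition above) =====
theorem ngrams_present_py_spec : Claim_equal_ngrams_present_py := by
  intro cleaned _
  show ngrams_present_py cleaned = ngrams_present_py_alt cleaned
  simp only [ngrams_present_py, ngrams_present_py_alt]
  exact congrArg PySem.Dict.items
    (pv_foldl_congr _ _ _
      (fun d col hcol => by rw [pv_phrase col hcol, pv_core]) _)
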